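-- pv_equiv track=rewrite | github.com/Milne-Group/SeqNado | seqnado/cli/benchmark_helpers.py | _shortest_unique_rule_labels
-- ===== SOURCE A (Python) =====
-- def _format_rule_label(rule: str) -> str:
--     """Convert a rule/path identifier into a human-readable label."""
--     if not rule or rule == "root":
--         return "root"
--     return rule.replace("_", " ").replace("/", " / ")
--
-- def _shortest_unique_rule_labels(rules: list[str]) -> dict[str, str]:
--     """Build the shortest unique human-readable suffix label for each rule path."""
--     unique_rules = list(dict.fromkeys(rules))
--     labels: dict[str, str] = {}
--
--     for rule in unique_rules:
--         parts = rule.split("/") if rule else ["root"]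
--         chosen = rule
--         for suffix_len in range(1, len(parts) + 1):
--             candidate = "/".join(parts[-suffix_len:])
--             collisions = 0
--             for other in unique_rules:
--                 other_parts = other.split("/") if other else ["root"]
--                 if (
--                     len(other_parts) >= suffix_len
--                     and "/".join(other_parts[-suffix_len:]) == candidate
--                 ):
--                     collisions += 1
--             if collisions == 1:
--                 chosen = candidate
--                 break
--         labels[rule] = _format_rule_label(chosen)
--
--     return labels
-- ===== SOURCE B (Python) =====
-- def _format_rule_label(rule: str) -> str:
--     """Convert a rule/path identifier into a human-readable label."""
--     if not rule or rule == "root":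
--         return "root"
--     return rule.replace("_", " ").replace("/", " / ")
--
-- def _shortest_unique_rule_labels(rules: list[str]) -> dict[str, str]:
--     """Shortest unique suffix label per rule, via one precomputed suffix counter."""
--     unique_rules = list(dict.fromkeys(rules))
--     parts_list = [r.split("/") if r else ["root"] for r in unique_rules]
--     counts: dict[tuple[int, str], int] = {}
--     for parts in parts_list:
--         for suffix_len in range(1, len(parts) + 1):
--             key = (suffix_len, "/".join(parts[-suffix_len:]))
--             counts[key] = counts.get(key, 0) + 1
--     labels: dict[str, str] = {}
--     for rule, parts in zip(unique_rules, parts_list):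
--         chosen = rule
--         for suffix_len in range(1, len(parts) + 1):
--             candidate = "/".join(parts[-suffix_len:])
--             if counts.get((suffix_len, candidate), 0) == 1:
--                 chosen = candidate
--                 break
--         labels[rule] = _format_rule_label(chosen)
--     return labels
-- ===== Notes on version B (the rewrite author's own statement) =====
-- stated objective: faster
-- what changed: Replaces the per-rule, per-suffix-length inner scan over all rules with a single precomputed counter of (suffix_len, suffix) keys; each rule then picks its shortest suffix by one dictionary lookup per length.
import Mathlib
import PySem

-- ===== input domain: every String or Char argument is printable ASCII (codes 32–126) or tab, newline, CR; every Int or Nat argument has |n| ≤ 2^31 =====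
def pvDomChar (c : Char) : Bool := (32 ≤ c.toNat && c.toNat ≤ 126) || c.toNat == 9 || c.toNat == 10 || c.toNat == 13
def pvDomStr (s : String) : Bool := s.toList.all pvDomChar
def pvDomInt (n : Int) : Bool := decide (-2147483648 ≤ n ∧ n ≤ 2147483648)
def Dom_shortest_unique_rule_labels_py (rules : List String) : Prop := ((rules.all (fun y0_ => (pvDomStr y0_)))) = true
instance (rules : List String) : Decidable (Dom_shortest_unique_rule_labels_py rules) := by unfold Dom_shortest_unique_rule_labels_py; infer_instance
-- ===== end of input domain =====

-- B replaces A's per-rule collision scan over all rules with one precomputed counter of (suffix_len, suffix) keys.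

-- ===== PORT A =====
-- shared helper: _format_rule_label (identical in both Pythons)
def pvFmtLabel (rule : String) : String :=
  if rule = "" ∨ rule = "root" then "root"
  else PySem.Str.replace (PySem.Str.replace rule "_" " ") "/" " / "

-- shared helper: `rule.split("/") if rule else ["root"]` (the same expression in both Pythons);
-- split? is some here since the separator "/" is nonempty
def pvPartsOf (rule : String) : List String :=
  if rule = "" then ["root"] else (PySem.Str.split? rule "/").getD []

-- A's inner `for suffix_len in range(1, len(parts)+1)` loop with its break, over the remaining lengths
def pvChooseA (uniq : List String) (parts : List String) : List Int → Option String
  | [] => none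
  | L :: rest =>
    let candidate := PySem.Str.join "/" (PySem.List.slice parts (some (-L)) none)
    let collisions : Int := uniq.foldl (fun acc other =>
        let otherParts := pvPartsOf other
        if L ≤ (otherParts.length : Int) ∧
            PySem.Str.join "/" (PySem.List.slice otherParts (some (-L)) none) = candidate
        then acc + 1 else acc) 0
    if collisions = 1 then some candidate else pvChooseA uniq parts rest

def shortest_unique_rule_labels_py (rules : List String) : List (String × String) :=
  let uniq := PySem.List.dedup rules
  (uniq.foldl (fun (labels : PySem.Dict String String) rule =>
      let parts := pvPartsOf rule
      let chosen := (pvChooseA uniq parts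
        (PySem.List.pyRange 1 ((parts.length : Int) + 1) 1)).getD rule
      labels.insert rule (pvFmtLabel chosen)) PySem.Dict.empty).items

-- ===== PORT B =====
-- "/".join(parts[-L:])
def pvSuffixB (parts : List String) (L : Int) : String :=
  PySem.Str.join "/" (PySem.List.slice parts (some (-L)) none)

-- B's counter of (suffix_len, suffix) keys, built once over all parts lists
def pvCountsB (partsList : List (List String)) : PySem.Dict (Int × String) Int :=
  partsList.foldl (fun d parts =>
    (PySem.List.pyRange 1 ((parts.length : Int) + 1) 1).foldl
      (fun d L => d.modify (L, pvSuffixB parts L) 0 (· + 1)) d) PySem.Dict.empty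

-- B's per-rule loop: one dictionary lookup per suffix length
def pvChooseB (counts : PySem.Dict (Int × String) Int) (parts : List String) : List Int → Option String
  | [] => none
  | L :: rest =>
    let candidate := pvSuffixB parts L
    if counts.getD (L, candidate) 0 = 1 then some candidate
    else pvChooseB counts parts rest

def shortest_unique_rule_labels_py_alt (rules : List String) : List (String × String) :=
  let uniq := PySem.List.dedup rules
  let partsList := uniq.map pvPartsOf
  let counts := pvCountsB partsList
  ((uniq.zip partsList).foldl (fun (labels : PySem.Dict String String) rp =>
      let chosen := (pvChooseB counts rp.2
        (PySem.List.pyRange 1 ((rp.2.length : Int) + 1) 1)).getD rp.1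
      labels.insert rp.1 (pvFmtLabel chosen)) PySem.Dict.empty).items

-- ===== PRECONDITION & SPEC =====
def Spec_shortest_unique_rule_labels_py (rules : List String) (out : List (String × String)) : Prop := out = shortest_unique_rule_labels_py_alt rules
instance (rules : List String) (out : List (String × String)) : Decidable (Spec_shortest_unique_rule_labels_py rules out) := by unfold Spec_shortest_unique_rule_labels_py; infer_instance

-- ===== CLAIM (what is proved, stated in full; the proofs are below) =====
def Claim_equal_shortest_unique_rule_labels_py : Prop := ∀ (rules : List String), Dom_shortest_unique_rule_labels_py rules → Spec_shortest_unique_rule_labels_py rules (shortest_unique_rule_labels_py rules)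

-- ===== LEMMAS AND PROOFS =====

-- a Bool predicate true at most at k0 is counted on range n by one test of k0
theorem pv_countP_range_unique (q : Nat → Bool) (k0 n : Nat)
    (h : ∀ k, q k = true → k = k0) :
    (List.range n).countP q = if k0 < n ∧ q k0 = true then 1 else 0 := by
  induction n with
  | zero => simp
  | succ n ih =>
    rw [List.range_succ, List.countP_append, ih]
    by_cases hq : q n = true
    · have := h n hq
      subst this
      simp [hq]
    · simp only [List.countP_singleton, hq, Bool.false_eq_true, if_false]
      rcases Nat.lt_or_ge k0 n with h1 | h1
      · simp [h1, Nat.lt_succ_of_lt h1]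
      · have : ¬ (k0 < n) := by omega
        simp only [this, false_and, if_false]
        rcases Nat.eq_or_lt_of_le h1 with h2 | h2
        · simp [← h2, hq]
        · have : ¬ (k0 < n + 1) := by omega
          simp [this]

-- the (suffix_len, suffix) keys one parts list contributes contain (L, cand) at most once
theorem pv_keys_count (p : List String) (L : Int) (cand : String) :
    ((PySem.List.pyRange 1 ((p.length : Int) + 1) 1).map
        (fun L' => (L', pvSuffixB p L'))).count (L, cand) =
      if 1 ≤ L ∧ L ≤ (p.length : Int) ∧ pvSuffixB p L = cand then 1 else 0 := by
  rw [PySem.List.pyRange_one, List.map_map, List.count_eq_countP, List.countP_map]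
  have hn : (((p.length : Int) + 1) - 1).toNat = p.length := by omega
  rw [hn]
  rw [pv_countP_range_unique _ (L - 1).toNat p.length
    (by
      intro k hk
      simp only [Function.comp_apply, beq_iff_eq, Prod.ext_iff] at hk
      omega)]
  have hiff : ((L - 1).toNat < p.length ∧
      ((fun x => x == (L, cand)) ∘ (fun L' => (L', pvSuffixB p L')) ∘ fun (k : Nat) => 1 + (k : Int))
        ((L - 1).toNat) = true)
      ↔ (1 ≤ L ∧ L ≤ (p.length : Int) ∧ pvSuffixB p L = cand) := by
    constructor
    · rintro ⟨hlt, hq⟩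
      simp only [Function.comp_apply, beq_iff_eq, Prod.ext_iff] at hq
      obtain ⟨hqL, hqs⟩ := hq
      have hk : (1 : Int) + ((L - 1).toNat : Int) = L := by omega
      rw [hk] at hqs
      exact ⟨by omega, by omega, hqs⟩
    · rintro ⟨h1, h2, h3⟩
      have hk : (1 : Int) + ((L - 1).toNat : Int) = L := by omega
      refine ⟨by omega, ?_⟩
      simp only [Function.comp_apply, beq_iff_eq, Prod.ext_iff, hk]
      exact ⟨by trivial, h3⟩
  rw [if_congr hiff rfl rfl]

-- B's counter at (L, cand) sums, over all parts lists, the indicator 1 ≤ L ≤ len ∧ suffix = cand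
theorem pvCountsB_getD_aux (ps : List (List String)) (d : PySem.Dict (Int × String) Int)
    (L : Int) (cand : String) :
    (ps.foldl (fun d parts =>
        (PySem.List.pyRange 1 ((parts.length : Int) + 1) 1).foldl
          (fun d L => d.modify (L, pvSuffixB parts L) 0 (· + 1)) d) d).getD (L, cand) 0 =
      d.getD (L, cand) 0 +
        (ps.map (fun p => if 1 ≤ L ∧ L ≤ (p.length : Int) ∧ pvSuffixB p L = cand
            then (1 : Int) else 0)).sum := by
  induction ps generalizing d with
  | nil => simp
  | cons p ps ih =>
    rw [List.foldl_cons, ih, List.map_cons, List.sum_cons]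
    have hfold : (PySem.List.pyRange 1 ((p.length : Int) + 1) 1).foldl
        (fun d L => d.modify (L, pvSuffixB p L) 0 (· + 1)) d
        = ((PySem.List.pyRange 1 ((p.length : Int) + 1) 1).map
            (fun L' => (L', pvSuffixB p L'))).foldl
          (fun d x => d.modify x 0 (· + 1)) d := by
      rw [List.foldl_map]
    rw [hfold, PySem.Dict.getD_foldl_modify_add_one, pv_keys_count]
    by_cases hc : 1 ≤ L ∧ L ≤ (p.length : Int) ∧ pvSuffixB p L = cand
    · simp [hc]; ring
    · simp [hc]

theorem pvCountsB_getD (ps : List (List String)) (L : Int) (cand : String) :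
    (pvCountsB ps).getD (L, cand) 0 =
      (ps.map (fun p => if 1 ≤ L ∧ L ≤ (p.length : Int) ∧ pvSuffixB p L = cand
          then (1 : Int) else 0)).sum := by
  unfold pvCountsB
  rw [pvCountsB_getD_aux]
  simp [PySem.Dict.empty, PySem.Dict.getD, PySem.Dict.get?]

-- A's collision scan computes B's counter value (for a length L ≥ 1)
theorem pvCollisions_eq (uniq : List String) (L : Int) (cand : String) (hL : 1 ≤ L) :
    (uniq.foldl (fun acc other =>
        let otherParts := pvPartsOf other
        if L ≤ (otherParts.length : Int) ∧
            PySem.Str.join "/" (PySem.List.slice otherParts (some (-L)) none) = cand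
        then acc + 1 else acc) (0 : Int)) =
      (pvCountsB (uniq.map pvPartsOf)).getD (L, cand) 0 := by
  rw [pvCountsB_getD, List.map_map]
  have h1 : (uniq.foldl (fun acc other =>
      let otherParts := pvPartsOf other
      if L ≤ (otherParts.length : Int) ∧
          PySem.Str.join "/" (PySem.List.slice otherParts (some (-L)) none) = cand
      then acc + 1 else acc) (0 : Int))
      = uniq.foldl (fun acc other =>
        if (decide (L ≤ ((pvPartsOf other).length : Int) ∧
            pvSuffixB (pvPartsOf other) L = cand)) = true then acc + 1 else acc) 0 := by
    apply PySem.List.foldl_congr_mem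
    intro acc x _
    simp [pvSuffixB]
  rw [h1, PySem.List.foldl_count_if, ← PySem.List.sum_map_ite_one_zero]
  simp only [zero_add, Function.comp_def]
  congr 1
  apply List.map_congr_left
  intro r _
  by_cases hc : L ≤ ((pvPartsOf r).length : Int) ∧ pvSuffixB (pvPartsOf r) L = cand
  · simp [hc, hL]
  · rw [if_neg, if_neg]
    · rintro ⟨-, h2, h3⟩; exact hc ⟨h2, h3⟩
    · simp only [decide_eq_true_eq]; exact hc

-- the two per-rule loops agree on any list of lengths ≥ 1
theorem pvChoose_eq (uniq : List String) (parts : List String) (Ls : List Int)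
    (h : ∀ L ∈ Ls, 1 ≤ L) :
    pvChooseA uniq parts Ls = pvChooseB (pvCountsB (uniq.map pvPartsOf)) parts Ls := by
  induction Ls with
  | nil => rfl
  | cons L rest ih =>
    have hL : 1 ≤ L := h L (List.mem_cons_self)
    rw [pvChooseA, pvChooseB]
    simp only
    rw [pvCollisions_eq uniq L _ hL]
    have hrec : pvChooseA uniq parts rest
        = pvChooseB (pvCountsB (uniq.map pvPartsOf)) parts rest :=
      ih (fun L' hL' => h L' (List.mem_cons_of_mem _ hL'))
    by_cases hc : (pvCountsB (uniq.map pvPartsOf)).getD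
        (L, PySem.Str.join "/" (PySem.List.slice parts (some (-L)) none)) 0 = 1
    · simp [pvSuffixB, hc]
    · simp [pvSuffixB, hc, hrec]

-- l.zip (l.map f) pairs each element with its image
theorem pv_zip_map {α β : Type} (l : List α) (f : α → β) :
    l.zip (l.map f) = l.map (fun x => (x, f x)) := by
  induction l with
  | nil => rfl
  | cons x xs ih => simp [ih]

-- ===== VERDICT (by name: the statement is the Claim_ definition above) =====
theorem shortest_unique_rule_labels_py_spec : Claim_equal_shortest_unique_rule_labels_py := by
  intro rules _
  unfold Spec_shortest_unique_rule_labels_py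
  unfold shortest_unique_rule_labels_py shortest_unique_rule_labels_py_alt
  simp only
  congr 1
  rw [pv_zip_map (PySem.List.dedup rules) pvPartsOf, List.foldl_map]
  apply PySem.List.foldl_congr_mem
  intro labels rule _
  simp only
  rw [pvChoose_eq]
  intro L hL
  rw [PySem.List.mem_pyRange_one] at hL
  omega
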